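-- pv_equiv track=rewrite | github.com/funderburkjim/ap90sly | changes/entries_from_lnum.py | mark_lines
-- ===== SOURCE A (Python) =====
-- def mark_lines(lines,lnums):
--  lnumset = set(lnums)
--  recs = []
--  for iline,line in enumerate(lines):
--   lnum = iline + 1
--   flag = (lnum in lnumset)
--   rec = (flag,line,lnum)
--   recs.append(rec)
--  return recs
-- ===== SOURCE B (Python) =====
-- def mark_lines(lines, lnums):
--     n = len(lines)
--     marks = sorted({v for v in lnums if 1 <= v <= n})
--     recs = []
--     prev = 0
--     for m in marks:
--         for k in range(prev + 1, m):
--             recs.append((False, lines[k - 1], k))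
--         recs.append((True, lines[m - 1], m))
--         prev = m
--     for k in range(prev + 1, n + 1):
--         recs.append((False, lines[k - 1], k))
--     return recs
-- ===== Notes on version B (the rewrite author's own statement) =====
-- stated objective: alternative
-- what changed: A tests set membership once per line while enumerating; B instead sorts the deduplicated in-range line numbers and emits the output in runs: for each consecutive mark it appends the block of unmarked lines before it, then the marked line, then a final unmarked tail run.
import Mathlib
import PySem

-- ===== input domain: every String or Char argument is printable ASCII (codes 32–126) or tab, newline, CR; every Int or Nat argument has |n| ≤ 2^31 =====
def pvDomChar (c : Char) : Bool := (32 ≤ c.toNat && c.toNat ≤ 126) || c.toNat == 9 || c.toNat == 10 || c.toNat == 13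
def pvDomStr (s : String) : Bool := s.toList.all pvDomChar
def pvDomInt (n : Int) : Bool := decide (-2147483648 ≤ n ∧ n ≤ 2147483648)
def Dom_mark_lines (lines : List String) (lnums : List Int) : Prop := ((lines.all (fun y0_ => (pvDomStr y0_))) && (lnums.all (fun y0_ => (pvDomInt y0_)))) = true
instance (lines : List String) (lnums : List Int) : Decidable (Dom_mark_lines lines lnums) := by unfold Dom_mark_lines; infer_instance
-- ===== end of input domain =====

-- B replaces A's per-line membership test with a sort of the valid line numbers and
-- one emission pass over the runs of unmarked lines between consecutive marks (alternative decomposition).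

-- ===== PORT A =====
def mark_lines (lines : List String) (lnums : List Int) : List (Bool × String × Int) :=
  let lnumset : PySem.Set Int := PySem.Set.ofList lnums
  (PySem.List.enumerate lines).foldl
    (fun recs p =>
      let lnum : Int := p.1 + 1
      let flag : Bool := PySem.Set.contains lnumset lnum
      let rec_ : Bool × String × Int := (flag, p.2, lnum)
      recs ++ [rec_]) []

-- ===== PORT B =====
-- lines[k-1] : every index reached is in range (1 ≤ k ≤ len(lines)), so pyGetD with
-- a dummy default is exact here.
def mark_lines_alt (lines : List String) (lnums : List Int) : List (Bool × String × Int) :=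
  let n : Int := lines.length
  let marks : List Int :=
    PySem.List.sorted (PySem.Set.ofList (lnums.filter (fun v => 1 ≤ v && v ≤ n))) (fun x => x) false
  let st :=
    marks.foldl
      (fun (st : List (Bool × String × Int) × Int) m =>
        let recs := (PySem.List.pyRange (st.2 + 1) m 1).foldl
          (fun r k => r ++ [(false, PySem.List.pyGetD lines (k - 1) "", k)]) st.1
        (recs ++ [(true, PySem.List.pyGetD lines (m - 1) "", m)], m))
      ([], 0)
  (PySem.List.pyRange (st.2 + 1) (n + 1) 1).foldl
    (fun r k => r ++ [(false, PySem.List.pyGetD lines (k - 1) "", k)]) st.1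

-- ===== PRECONDITION & SPEC =====
def Spec_mark_lines (lines : List String) (lnums : List Int) (out : List (Bool × String × Int)) : Prop := out = mark_lines_alt lines lnums
instance (lines : List String) (lnums : List Int) (out : List (Bool × String × Int)) : Decidable (Spec_mark_lines lines lnums out) := by unfold Spec_mark_lines; infer_instance

-- ===== CLAIM (what is proved, stated in full; the proofs are below) =====
def Claim_equal_mark_lines : Prop := ∀ (lines : List String) (lnums : List Int), Dom_mark_lines lines lnums → Spec_mark_lines lines lnums (mark_lines lines lnums)

-- ===== LEMMAS AND PROOFS =====

-- B's loop over the sorted marks, followed by the tail run, emits exactly the segment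
-- prev+1 .. n with the membership flags, appended to the accumulator.
theorem pv_emit_spec (lines : List String) (n : Int) :
    ∀ (ms : List Int) (acc : List (Bool × String × Int)) (prev : Int),
      ms.Pairwise (· < ·) → (∀ m ∈ ms, prev < m ∧ m ≤ n) →
      (let st := ms.foldl
          (fun (st : List (Bool × String × Int) × Int) m =>
            let recs := (PySem.List.pyRange (st.2 + 1) m 1).foldl
              (fun r k => r ++ [(false, PySem.List.pyGetD lines (k - 1) "", k)]) st.1
            (recs ++ [(true, PySem.List.pyGetD lines (m - 1) "", m)], m))
          (acc, prev);
        (PySem.List.pyRange (st.2 + 1) (n + 1) 1).foldl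
          (fun r k => r ++ [(false, PySem.List.pyGetD lines (k - 1) "", k)]) st.1)
      = acc ++ (PySem.List.pyRange (prev + 1) (n + 1) 1).map
          (fun k => (decide (k ∈ ms), PySem.List.pyGetD lines (k - 1) "", k)) := by
  intro ms
  induction ms with
  | nil =>
    intro acc prev _ _
    simp only [List.foldl_nil]
    rw [PySem.List.foldl_append_singleton_eq_map]
    simp
  | cons m ms ih =>
    intro acc prev hpw hb
    have hbm := hb m List.mem_cons_self
    have hpw' := (List.pairwise_cons.mp hpw)
    simp only [List.foldl_cons]
    rw [ih _ m hpw'.2 (fun m' hm' => ⟨hpw'.1 m' hm', (hb m' (List.mem_cons_of_mem _ hm')).2⟩)]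
    rw [PySem.List.foldl_append_singleton_eq_map]
    have hsplit1 : PySem.List.pyRange (prev + 1) (n + 1) 1
        = PySem.List.pyRange (prev + 1) m 1 ++ PySem.List.pyRange m (n + 1) 1 :=
      PySem.List.pyRange_one_append _ _ _ (by omega) (by omega)
    have hsplit2 : PySem.List.pyRange m (n + 1) 1 = m :: PySem.List.pyRange (m + 1) (n + 1) 1 :=
      PySem.List.pyRange_one_cons (by omega)
    have e1 : (PySem.List.pyRange (prev + 1) m 1).map
          (fun k => (decide (k ∈ m :: ms), PySem.List.pyGetD lines (k - 1) "", k))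
        = (PySem.List.pyRange (prev + 1) m 1).map
          (fun k => ((false : Bool), PySem.List.pyGetD lines (k - 1) "", k)) := by
      apply List.map_congr_left
      intro k hk
      rw [PySem.List.mem_pyRange_one] at hk
      have hkn : k ∉ m :: ms := by
        intro hmem
        rcases List.mem_cons.mp hmem with h | h
        · omega
        · exact absurd (hpw'.1 k h) (by omega)
      simp [hkn]
    have e3 : (PySem.List.pyRange (m + 1) (n + 1) 1).map
          (fun k => (decide (k ∈ m :: ms), PySem.List.pyGetD lines (k - 1) "", k))
        = (PySem.List.pyRange (m + 1) (n + 1) 1).map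
          (fun k => (decide (k ∈ ms), PySem.List.pyGetD lines (k - 1) "", k)) := by
      apply List.map_congr_left
      intro k hk
      rw [PySem.List.mem_pyRange_one] at hk
      have : (k ∈ m :: ms) ↔ (k ∈ ms) := by
        rw [List.mem_cons]
        constructor
        · intro h2
          rcases h2 with h | h
          · omega
          · exact h
        · exact Or.inr
      rw [decide_eq_decide.mpr this]
    rw [hsplit1, hsplit2, List.map_append, List.map_cons, e1, e3]
    simp [List.append_assoc]

theorem mark_lines_eq (lines : List String) (lnums : List Int) :
    mark_lines lines lnums = mark_lines_alt lines lnums := by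
  unfold mark_lines mark_lines_alt
  rw [PySem.List.foldl_append_singleton_eq_map]
  simp only [List.nil_append]
  rw [pv_emit_spec lines (lines.length : Int) _ [] 0
      (PySem.List.sorted_ofList_pairwise_lt _)
      (by
        intro m hm
        rw [PySem.List.mem_sorted, PySem.Set.mem_ofList, List.mem_filter] at hm
        simp only [Bool.and_eq_true, decide_eq_true_eq] at hm
        omega)]
  simp only [List.nil_append]
  apply List.ext_getElem
  · simp [PySem.List.length_pyRange_one, PySem.List.length_enumerate]
  · intro i h1 h2
    simp only [List.getElem_map, PySem.List.getElem_enumerate, PySem.List.getElem_pyRange_one]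
    have hi : i < lines.length := by
      simpa [PySem.List.length_enumerate] using h1
    rw [show (0 : Int) + 1 + (i : Int) = (i : Int) + 1 by ring,
        show (0 : Int) + (i : Int) + 1 = (i : Int) + 1 by ring]
    have hget : PySem.List.pyGetD lines ((i : Int) + 1 - 1) "" = lines[i] := by
      rw [show ((i : Int) + 1 - 1) = ((i : Nat) : Int) by ring,
          PySem.List.pyGetD_natCast, List.getD_eq_getElem _ _ hi]
    rw [hget]
    have hmem : (((i : Int) + 1) ∈
          PySem.List.sorted (PySem.Set.ofList (lnums.filter
            (fun v => 1 ≤ v && v ≤ (lines.length : Int)))) (fun x => x) false)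
        ↔ (((i : Int) + 1) ∈ lnums) := by
      rw [PySem.List.mem_sorted, PySem.Set.mem_ofList, List.mem_filter]
      simp only [Bool.and_eq_true, decide_eq_true_eq]
      constructor
      · exact fun h => h.1
      · intro h
        exact ⟨h, by omega, by omega⟩
    by_cases hm : ((i : Int) + 1) ∈ lnums
    · rw [decide_eq_true (hmem.mpr hm)]
      have : PySem.Set.contains (PySem.Set.ofList lnums) ((i : Int) + 1) = true := by
        rw [PySem.Set.contains_iff, PySem.Set.mem_ofList]; exact hm
      rw [this]
    · rw [decide_eq_false (fun h => hm (hmem.mp h))]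
      have : PySem.Set.contains (PySem.Set.ofList lnums) ((i : Int) + 1) = false := by
        rw [← Bool.not_eq_true, PySem.Set.contains_iff, PySem.Set.mem_ofList]; exact hm
      rw [this]

-- ===== VERDICT (by name: the statement is the Claim_ definition above) =====
theorem mark_lines_spec : Claim_equal_mark_lines := by
  intro lines lnums _
  unfold Spec_mark_lines
  exact mark_lines_eq lines lnums
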